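/- GENERATED by mk_final_copies.py from the proof of the farm's unit `stb_vorbis_get_frame_float.3` (farm:stb_vorbis_get_frame_float.3.1: Proof.lean) as the
   re-elaboration sweep compiled it — do not edit. -/
import Asan.CheckWalk
import Vorbis.Spec.Units.stb_vorbis_get_frame_float_3

open X86 X86.User Asan Vorbis Vorbis.Spec

set_option maxRecDepth 4000
set_option maxHeartbeats 4000000

namespace Vorbis.Spec.stb_vorbis_get_frame_float_3

/-- **An `int` field off the stack region keeps its value over stores into the stack region** (`blocksize_1` of `*f` over the
two stores of `len`). -/
theorem seg3_i32_off_stack {m m' : Mem} (hs : Mem.SameExcept [⟨0x700000, 0x800000⟩] m m') (a : Nat)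
    (ha : a + 4 ≤ 0x700000 ∨ 0x800000 ≤ a) (hlt : a + 4 ≤ 0xC00000) : m'.i32 a = m.i32 a := by
  have ea : (addr a).toNat = a := toNat_addr a (by omega)
  unfold Mem.i32 Mem.u32
  rw [hs.readLE (addr a) 4 (by omega) ?_]
  intro w hw
  have e1 : w = ⟨0x700000, 0x800000⟩ := List.mem_singleton.mp hw
  subst e1
  simp only
  omega

end Vorbis.Spec.stb_vorbis_get_frame_float_3

/-- **Segment 3**: from `cut2` (`AtCut2`) to the loop head with `i = 0` (`AtLoop`). -/
theorem Vorbis.Spec.Worked.stb_vorbis_get_frame_float_3_ok : Vorbis.Spec.stb_vorbis_get_frame_float_3.Statement := by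
  intro Lay hLay μ hμ u₀ hcode others frames len A stored room ysz u ret f left r v hat
  -- the entry state's facts, from the assertion
  have he := hat.body.frame.entry
  have hpre := hat.body.frame.pre
  have hf := hat.body.frame.rdi
  have he0 := he
  have hpre0 := hpre
  v_entry he
  obtain ⟨hsh, hdi0, hpc, hpo, hapart⟩ := hpre
  obtain ⟨j_rip, hbody, c_rax, hr31, hleft, hleft31, hbound⟩ := hat
  obtain ⟨hfrm, c_rbx, hsch, hsou⟩ := hbody
  obtain ⟨_, _, _, c_rsp, c_r14, hs15, hs14, hs13, hs12, hsbp, hsbx, hs0, hsame, j_code, j_inv, hinv, hdi⟩ := hfrm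
  have hwf := stb_vorbis_get_frame_float.gff_obj_where hdi
  -- the out-pointers play no part in this segment
  clear hpc hpo hapart hdi0 hsh
  have w_rip := j_rip
  have w_eq := Vorbis.conv_code_eqOn j_code
  have hdf : v.flags .df = false := (show X86.User.abiInv _ from j_inv).1
  have hmx : v.mxcsr &&& 0x1F80 = 0x1F80 := (show X86.User.abiInv _ from j_inv).2
  have hsse := Vorbis.sseOK_of_abiInv j_inv
  have w_kept : RegsKept [.rsp] v v := RegsKept.refl _ _
  u_walk hcode [hμ.vendor] until [Vorbis.L.stb_vorbis_get_frame_float.loop1] span [Vorbis.L.textLo, Vorbis.L.textHi] side (v_side)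
  -- 1197F5H = loop1: the assertion `AtLoop` with `i = 0`
  have e_rip : s_1197b5.rip = Vorbis.L.stb_vorbis_get_frame_float.loop1 := by
    rw [w_rip]
    rfl
  -- the two stores stay inside the stack region
  have hsS : Mem.SameExcept [⟨0x700000, 0x800000⟩] v.mem s_1197b5.mem := by
    rw [w_mem]
    u_same
  -- the shadow layer: no store went to the shadow
  have hinv' : ShadowInv others (stb_vorbis_get_frame_float.ownFrames u frames) ((u.reg .rsp).toNat - 184)
      s_1197b5.mem := by
    rw [w_mem]
    refine ShadowInv.writeLE ?_ _ _ _ (by u_omega) (by u_omega)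
    exact ShadowInv.writeLE hinv _ _ _ (by u_omega) (by u_omega)
  -- the decode-time invariant over two stack stores
  have hdi' : DecodeInv others (stb_vorbis_get_frame_float.ownFrames u frames) len A stored room ysz s_1197b5.mem f := by
    refine stb_vorbis_get_frame_float.decodeInv_stores hdi hinv' hsS ?_
    intro sp hsp
    have e1 : sp = ⟨0x700000, 0x800000⟩ := List.mem_singleton.mp hsp
    subst e1
    exact Or.inl ⟨Nat.le_refl _, Nat.le_refl _⟩
  -- the stored value is the number `r`
  rw [cnt32_part_toNat r (by omega)] at w_mem
  -- `ch` = `f->channels` in the present memory, non-negative by HD1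
  have hch0 : 0 ≤ stb_vorbis.channels s_1197b5.mem f := by
    have h1 := hdi'.config.header.HD1.1
    omega
  -- `blocksize_1` is off the stack region
  have eb1 : stb_vorbis.blocksize_1 s_1197b5.mem f = stb_vorbis.blocksize_1 v.mem f := by
    simp only [vacc, voff]
    exact Vorbis.Spec.stb_vorbis_get_frame_float_3.seg3_i32_off_stack hsS _ (by omega) (by omega)
  -- the stack slots through the two stores
  have ks15 : UInt64.ofNat (s_1197b5.mem.readLE (u.reg .rsp - 8) 8) = u.reg .r15 := by u_frame hs15
  have ks14 : UInt64.ofNat (s_1197b5.mem.readLE (u.reg .rsp - 16) 8) = u.reg .r14 := by u_frame hs14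
  have ks13 : UInt64.ofNat (s_1197b5.mem.readLE (u.reg .rsp - 24) 8) = u.reg .r13 := by u_frame hs13
  have ks12 : UInt64.ofNat (s_1197b5.mem.readLE (u.reg .rsp - 32) 8) = u.reg .r12 := by u_frame hs12
  have ksbp : UInt64.ofNat (s_1197b5.mem.readLE (u.reg .rsp - 40) 8) = u.reg .rbp := by u_frame hsbp
  have ksbx : UInt64.ofNat (s_1197b5.mem.readLE (u.reg .rsp - 48) 8) = u.reg .rbx := by u_frame hsbx
  have ks0 : UInt64.ofNat (s_1197b5.mem.readLE (u.reg .rsp) 8) = ret := by u_frame hs0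
  have ksch : UInt64.ofNat (s_1197b5.mem.readLE (u.reg .rsp - 176) 8) = u.reg .rsi := by u_frame hsch
  have ksou : UInt64.ofNat (s_1197b5.mem.readLE (u.reg .rsp - 168) 8) = u.reg .rdx := by u_frame hsou
  have ksleft : s_1197b5.mem.readLE (u.reg .rsp - 88) 4 = left := by u_frame hleft
  -- the two copies of the result
  have ksr : s_1197b5.mem.readLE (u.reg .rsp - 156) 4 = r := by
    rw [w_mem]
    u_read
  have kslen : s_1197b5.mem.readLE (u.reg .rsp - 120) 4 = r := by
    rw [w_mem]
    u_read
  -- the footprint so far: the contract's still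
  have hsame' : Mem.SameExcept [⟨(u.reg .rsp).toNat - 4240, (u.reg .rsp).toNat⟩, ⟨A.B, A.B + A.L⟩, ⟨0xC00000, 0xE00000⟩,
      ⟨(u.reg .rsi).toNat, (u.reg .rsi).toNat + 4⟩, ⟨(u.reg .rdx).toNat, (u.reg .rdx).toNat + 8⟩] u.mem s_1197b5.mem := by
    rw [w_mem]
    u_same
  -- DF and MXCSR: no instruction of the segment writes them
  have k_inv : (conv u₀).inv s_1197b5 := by
    show X86.User.abiInv _
    refine Vorbis.abiInv_of ?_ ?_
    · rw [w_flags]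
      exact hdf
    · rw [w_mxcsr]
      exact hmx
  have k_r14 : s_1197b5.reg .r14 = (u.reg .rsp - 152) >>> 3 := by
    rw [w_kept .r14 rfl]
    exact c_r14
  have k_rbx : s_1197b5.reg .rbx = u.reg .rdi := by
    rw [w_kept .rbx rfl]
    exact c_rbx
  have hframe : stb_vorbis_get_frame_float.GFrame others frames len A stored room ysz u₀ u ret f s_1197b5 :=
    ⟨he0, hpre0, hf, w_rsp, k_r14, ks15, ks14, ks13, ks12, ksbp, ksbx, ks0, hsame', Vorbis.conv_code_in w_eq, k_inv,
      hinv', hdi'⟩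
  refine ReachVia.done ⟨(stb_vorbis.channels s_1197b5.mem f).toNat, ?_⟩
  refine ⟨e_rip, ⟨hframe, k_rbx, ksch, ksou⟩, w_r13, ?_, Nat.zero_le _, ksr, kslen, hr31, ksleft, hleft31, ?_, ?_⟩
  · -- `chan`
    exact (Int.toNat_of_nonneg hch0).symm
  · -- `bound`
    rw [eb1]
    exact hbound
  · -- `outs`: vacuous for `i = 0`
    intro c hc
    exact absurd hc (Nat.not_lt_zero c)
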